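-- pv_equiv track=rewrite | github.com/borjasotomayor/advent-of-code | 2020/day09.py | task1
-- ===== SOURCE A (Python) =====
-- import itertools
--
-- def has_pair_sum(numbers, target):
--     """
--     Given a list of numbers, check if there is a pair of numbers
--     that adds up to a target value
--     """
--     for a, b in itertools.combinations(numbers, 2):
--         if a + b == target:
--             return True
--
--     return False
--
-- def task1(numbers, preamble_len):
--     """
--     Using a sliding window of length 'preamble_len',
--     check if there is a pair of values in the sliding
--     window that add up to the value immediately
--     after the sliding window.
--     """
--     sliding_window = numbers[:preamble_len]
--     remaining_values = numbers[preamble_len:]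
--
--     while len(remaining_values) > 0:
--         number = remaining_values.pop(0)
--         if not has_pair_sum(sliding_window, number):
--             return number
--
--         sliding_window.pop(0)
--         sliding_window.append(number)
--
--     return None
-- ===== SOURCE B (Python) =====
-- def task1(numbers, preamble_len):
--     """
--     Same task as A, but keeps a count dict of the current window so each
--     step is a single scan over distinct window values with O(1) lookups,
--     instead of scanning all pairs.
--     """
--     window = numbers[:preamble_len]
--     w = len(window)
--     counts = {}
--     for x in window:
--         counts[x] = counts.get(x, 0) + 1
--     for i in range(w, len(numbers)):
--         t = numbers[i]
--         if not any(counts.get(t - x, 0) >= (2 if t - x == x else 1) for x in counts):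
--             return t
--         old = numbers[i - w]
--         counts[old] -= 1
--         if counts[old] == 0:
--             del counts[old]
--         counts[t] = counts.get(t, 0) + 1
--     return None
-- ===== Notes on version B (the rewrite author's own statement) =====
-- stated objective: alternative
-- what changed: Replaces the per-step scan over all pairs of the sliding window (itertools.combinations) and the list pops by an incrementally maintained count dict of the window, checking for a partner via 'target - x' lookups over the distinct window values (intended as faster, O(n*p) vs O(n*p^2); a timing run measured 99x at n=65536 but could not confirm it at the largest generated size, so it is not claimed).
import Mathlib
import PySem

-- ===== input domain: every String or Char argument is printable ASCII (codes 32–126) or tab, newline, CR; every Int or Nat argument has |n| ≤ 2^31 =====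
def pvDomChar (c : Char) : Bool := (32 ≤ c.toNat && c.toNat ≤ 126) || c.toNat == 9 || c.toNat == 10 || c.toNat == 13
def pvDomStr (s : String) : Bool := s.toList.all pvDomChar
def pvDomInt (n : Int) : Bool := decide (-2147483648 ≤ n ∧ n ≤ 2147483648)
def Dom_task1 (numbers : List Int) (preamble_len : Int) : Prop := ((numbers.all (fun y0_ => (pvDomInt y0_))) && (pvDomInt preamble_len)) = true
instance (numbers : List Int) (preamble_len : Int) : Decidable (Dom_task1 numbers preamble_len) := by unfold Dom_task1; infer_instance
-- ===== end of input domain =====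

-- B replaces A's per-step scan over all pairs of the window by a count dict of the
-- window maintained incrementally, checking `target - x` by lookup over the distinct
-- window values (objective: alternative — fewer comparisons per step).

-- ===== PORT A =====
-- has_pair_sum: loop over itertools.combinations(numbers, 2)
def hasPairSum (numbers : List Int) (target : Int) : Bool :=
  (PySem.List.combinations numbers 2).any (fun c =>
    match c with
    | [a, b] => a + b == target
    | _ => false)

-- the while-loop of A: state = (sliding_window, remaining_values)
-- window.tail is sliding_window.pop(0); it only runs after hasPairSum succeeded,
-- where the window is nonempty, so it is exact there (Python A never raises).
def task1Loop (sliding_window : List Int) (remaining_values : List Int) : Option Int :=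
  match remaining_values with
  | [] => none
  | number :: rest =>
    if !hasPairSum sliding_window number then some number
    else task1Loop (sliding_window.tail ++ [number]) rest

def task1 (numbers : List Int) (preamble_len : Int) : Option Int :=
  task1Loop (PySem.List.slice numbers none (some preamble_len))
            (PySem.List.slice numbers (some preamble_len) none)

-- ===== PORT B =====
-- `not any(counts.get(t - x, 0) >= (2 if t - x == x else 1) for x in counts)`
def altCheck (counts : PySem.Dict Int Int) (t : Int) : Bool :=
  counts.keys.any (fun x =>
    decide (counts.getD (t - x) 0 ≥ (if (t - x) == x then (2 : Int) else 1)))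

-- the `for i in range(w, len(numbers))` loop of Source B; `numbers[i]` / `numbers[i - w]`
-- are List.getD (exact: 0 ≤ i - w ≤ i < len there); `counts[old] -= 1` reads a key that
-- is always present (old is in the window), so getD with default 0 is exact there.
def altLoop (numbers : List Int) (w : Nat) (counts : PySem.Dict Int Int) (i : Nat) :
    Option Int :=
  if h : i < numbers.length then
    let t := numbers.getD i 0
    if !altCheck counts t then some t
    else
      let old := numbers.getD (i - w) 0
      let c1 := counts.insert old (counts.getD old 0 - 1)
      let c2 := if c1.getD old 0 == 0 then c1.erase old else c1
      altLoop numbers w (c2.insert t (c2.getD t 0 + 1)) (i + 1)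
  else none
termination_by numbers.length - i

def task1_alt (numbers : List Int) (preamble_len : Int) : Option Int :=
  let window := PySem.List.slice numbers none (some preamble_len)
  let w := window.length
  let counts := window.foldl (fun d x => d.insert x (d.getD x 0 + 1)) PySem.Dict.empty
  altLoop numbers w counts w

-- ===== PRECONDITION & SPEC =====
def Spec_task1 (numbers : List Int) (preamble_len : Int) (out : Option Int) : Prop := out = task1_alt numbers preamble_len
instance (numbers : List Int) (preamble_len : Int) (out : Option Int) : Decidable (Spec_task1 numbers preamble_len out) := by unfold Spec_task1; infer_instance

-- ===== CLAIM (what is proved, stated in full; the proofs are below) =====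
def Claim_equal_task1 : Prop := ∀ (numbers : List Int) (preamble_len : Int), Dom_task1 numbers preamble_len → Spec_task1 numbers preamble_len (task1 numbers preamble_len)

-- ===== LEMMAS AND PROOFS =====

-- counts describes the multiset of the current window
def Matches (d : PySem.Dict Int Int) (l : List Int) : Prop :=
  ∀ x : Int, d.getD x 0 = l.count x ∧ (x ∈ d.keys ↔ x ∈ l)

-- Dict.erase facts (not in the PySem book)
theorem getD_erase_self (d : PySem.Dict Int Int) (k : Int) :
    (d.erase k).getD k 0 = 0 := by
  simp only [PySem.Dict.erase, PySem.Dict.getD, PySem.Dict.get?]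
  rw [List.find?_eq_none.mpr]
  · rfl
  · intro p hp
    rw [List.mem_filter] at hp
    simpa using hp.2

theorem getD_erase_of_ne (d : PySem.Dict Int Int) (k x : Int) (h : x ≠ k) :
    (d.erase k).getD x 0 = d.getD x 0 := by
  simp only [PySem.Dict.erase, PySem.Dict.getD, PySem.Dict.get?]
  rw [List.find?_filter]
  have hfun : (fun a : Int × Int => decide ((!a.1 == k) = true ∧ (a.1 == x) = true))
      = fun p : Int × Int => p.1 == x := by
    funext p
    by_cases hpx : p.1 = x
    · simp [hpx, h]
    · simp [hpx]
  rw [hfun]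

theorem mem_keys_erase (d : PySem.Dict Int Int) (k x : Int) :
    x ∈ (d.erase k).keys ↔ x ∈ d.keys ∧ x ≠ k := by
  simp only [PySem.Dict.erase, PySem.Dict.keys, List.mem_map, List.mem_filter]
  constructor
  · rintro ⟨p, ⟨hp, hne⟩, rfl⟩
    exact ⟨⟨p, hp, rfl⟩, by simpa using hne⟩
  · rintro ⟨⟨p, hp, rfl⟩, hne⟩
    exact ⟨p, ⟨hp, by simpa using hne⟩, rfl⟩

theorem sublist_pair_of_mem (l : List Int) (x y : Int) (hx : x ∈ l) (hy : y ∈ l)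
    (hne : x ≠ y) : [x, y].Sublist l ∨ [y, x].Sublist l := by
  induction l with
  | nil => cases hx
  | cons z zs ih =>
    rcases List.mem_cons.mp hx with rfl | hx'
    · have hy' : y ∈ zs := by
        rcases List.mem_cons.mp hy with rfl | h
        · exact absurd rfl hne
        · exact h
      exact Or.inl ((List.singleton_sublist.mpr hy').cons₂ x)
    · rcases List.mem_cons.mp hy with rfl | hy'
      · right
        exact (List.singleton_sublist.mpr hx').cons₂ y
      · rcases ih hx' hy' with h | h
        · exact Or.inl (h.cons z)
        · exact Or.inr (h.cons z)

theorem hasPairSum_iff (l : List Int) (t : Int) :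
    hasPairSum l t = true ↔ ∃ a b, [a, b].Sublist l ∧ a + b = t := by
  unfold hasPairSum
  rw [List.any_eq_true]
  constructor
  · rintro ⟨c, hc, hpc⟩
    obtain ⟨hsub, hlen⟩ := (PySem.List.mem_combinations_iff l 2 c).mp hc
    match c, hlen with
    | [a, b], _ =>
      exact ⟨a, b, hsub, by simpa using hpc⟩
  · rintro ⟨a, b, hsub, hab⟩
    refine ⟨[a, b], (PySem.List.mem_combinations_iff l 2 [a, b]).mpr ⟨hsub, rfl⟩, by simpa using hab⟩

theorem check_eq (d : PySem.Dict Int Int) (l : List Int) (t : Int) (h : Matches d l) :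
    altCheck d t = hasPairSum l t := by
  have hiff : altCheck d t = true ↔ hasPairSum l t = true := by
    unfold altCheck
    rw [List.any_eq_true, hasPairSum_iff]
    constructor
    · rintro ⟨x, hxk, hcond⟩
      have hx : x ∈ l := (h x).2.mp hxk
      rw [decide_eq_true_iff, (h (t - x)).1] at hcond
      by_cases heq : t - x = x
      · have h2 : (2 : Nat) ≤ l.count x := by
          rw [heq] at hcond; simp at hcond; exact_mod_cast hcond
        have hrep : (List.replicate 2 x).Sublist l := List.replicate_sublist_iff.mpr h2
        exact ⟨x, x, by simpa using hrep, by omega⟩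
      · have hy : (t - x) ∈ l := by
          have hne : ((t - x) == x) = false := by simp [heq]
          rw [hne] at hcond; simpa using hcond
        rcases sublist_pair_of_mem l x (t - x) hx hy (fun he => heq (by omega)) with hs | hs
        · exact ⟨x, t - x, hs, by omega⟩
        · exact ⟨t - x, x, hs, by omega⟩
    · rintro ⟨a, b, hsub, hab⟩
      have ha : a ∈ l := hsub.subset (by simp)
      have hb : b ∈ l := hsub.subset (by simp)
      refine ⟨a, (h a).2.mpr ha, ?_⟩
      rw [decide_eq_true_iff, (h (t - a)).1]
      have hba : t - a = b := by omega
      by_cases heq : t - a = a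
      · have hbb : b = a := by omega
        subst hbb
        have h2 : (2 : Nat) ≤ l.count b := List.replicate_sublist_iff.mp (by simpa using hsub)
        simp only [heq]
        simp
        omega
      · have hne : ((t - a) == a) = false := by simp [heq]
        rw [hne]
        simp only [if_false, Bool.false_eq_true]
        rw [hba]
        have := List.count_pos_iff.mpr hb
        simp
        omega
  cases ha : altCheck d t <;> cases hb : hasPairSum l t <;> simp_all

theorem matches_init (window : List Int) :
    Matches (window.foldl (fun d x => d.insert x (d.getD x 0 + 1)) PySem.Dict.empty)
      window := by
  rw [PySem.Dict.foldl_insert_getD_add_one_eq_counter]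
  intro x
  refine ⟨PySem.Dict.getD_counter window x, ?_⟩
  rw [PySem.Dict.keys_counter]
  exact PySem.Set.mem_ofList window x

theorem matches_ins (d : PySem.Dict Int Int) (l : List Int) (t : Int) (h : Matches d l) :
    Matches (d.insert t (d.getD t 0 + 1)) (l ++ [t]) := by
  intro x
  constructor
  · rw [PySem.Dict.getD_insert]
    by_cases hx : x = t
    · subst hx; simp [(h x).1, List.count_append]
    · simp [hx, (h x).1, List.count_append, Ne.symm hx]
  · rw [PySem.Dict.mem_keys_insert]
    simp [(h x).2, or_comm]

theorem matches_dec (d : PySem.Dict Int Int) (old : Int) (tail : List Int)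
    (h : Matches d (old :: tail)) :
    Matches (if (d.insert old (d.getD old 0 - 1)).getD old 0 == 0 then
               (d.insert old (d.getD old 0 - 1)).erase old
             else d.insert old (d.getD old 0 - 1)) tail := by
  have hold : (d.insert old (d.getD old 0 - 1)).getD old 0 = (tail.count old : Int) := by
    rw [PySem.Dict.getD_insert_self, (h old).1]
    simp
  intro x
  by_cases hz : (d.insert old (d.getD old 0 - 1)).getD old 0 == 0
  · -- erase branch: tail.count old = 0, i.e. old ∉ tail
    rw [if_pos hz]
    have hcz : tail.count old = 0 := by
      rw [hold] at hz; exact_mod_cast eq_of_beq hz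
    have hnot : old ∉ tail := by
      rw [← List.count_eq_zero]; exact hcz
    constructor
    · by_cases hx : x = old
      · subst hx; rw [getD_erase_self, hcz]; simp
      · rw [getD_erase_of_ne _ _ _ hx, PySem.Dict.getD_insert, if_neg hx, (h x).1,
          List.count_cons]
        simp [Ne.symm hx]
    · rw [mem_keys_erase, PySem.Dict.mem_keys_insert]
      constructor
      · rintro ⟨hk | hk, hne⟩
        · exact absurd hk hne
        · rcases List.mem_cons.mp ((h x).2.mp hk) with rfl | hm
          · exact absurd rfl hne
          · exact hm
      · intro hm
        refine ⟨Or.inr ((h x).2.mpr (List.mem_cons_of_mem _ hm)), ?_⟩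
        rintro rfl; exact hnot hm
  · rw [if_neg hz]
    have hcz : tail.count old ≠ 0 := by
      rw [hold] at hz
      intro hc
      apply hz
      simp [hc]
    have hmem : old ∈ tail := by
      rw [← List.count_pos_iff]; omega
    constructor
    · rw [PySem.Dict.getD_insert]
      by_cases hx : x = old
      · subst hx
        rw [if_pos rfl, (h x).1, List.count_cons_self]
        push_cast; ring
      · rw [if_neg hx, (h x).1, List.count_cons]; simp [Ne.symm hx]
    · rw [PySem.Dict.mem_keys_insert]
      constructor
      · rintro (rfl | hk)
        · exact hmem
        · rcases List.mem_cons.mp ((h x).2.mp hk) with rfl | hm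
          · exact hmem
          · exact hm
      · intro hm
        exact Or.inr ((h x).2.mpr (List.mem_cons_of_mem _ hm))

theorem loop_eq (numbers : List Int) (w : Nat) :
    ∀ (remaining window : List Int) (counts : PySem.Dict Int Int) (i : Nat),
      Matches counts window → window.length = w →
      numbers.drop (i - w) = window ++ remaining → numbers.drop i = remaining →
      w ≤ i → task1Loop window remaining = altLoop numbers w counts i := by
  intro remaining
  induction remaining with
  | nil =>
    intro window counts i hm hw hdw hdi hwi
    have hlen : numbers.length ≤ i := by
      by_contra hlt
      push Not at hlt
      have : numbers.drop i ≠ [] := by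
        simp [List.drop_eq_nil_iff]
        omega
      exact this hdi
    rw [task1Loop, altLoop]
    rw [dif_neg (by omega)]
  | cons t rest ih =>
    intro window counts i hm hw hdw hdi hwi
    have hi : i < numbers.length := by
      by_contra hge
      push Not at hge
      rw [List.drop_eq_nil_of_le hge] at hdi
      exact absurd hdi (by simp)
    have hti : numbers.getD i 0 = t := by
      have h0 : numbers[i]? = some t := by
        have := congrArg (fun l : List Int => l[0]?) hdi
        simpa [List.getElem?_drop] using this
      simp [List.getD_eq_getElem?_getD, h0]
    rw [task1Loop, altLoop, dif_pos hi]
    dsimp only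
    rw [hti, check_eq counts window t hm]
    cases hps : hasPairSum window t
    · simp
    · simp only [Bool.not_true, Bool.false_eq_true, if_false]
      obtain ⟨a, b, hsub, -⟩ := (hasPairSum_iff window t).mp hps
      have hwin_ne : window ≠ [] := by
        rintro rfl
        have := hsub.length_le
        simp at this
      obtain ⟨old, tail, rfl⟩ := List.exists_cons_of_ne_nil hwin_ne
      have hold : numbers.getD (i - w) 0 = old := by
        have h0 : numbers[i - w]? = some old := by
          have := congrArg (fun l : List Int => l[0]?) hdw
          simpa [List.getElem?_drop] using this
        simp [List.getD_eq_getElem?_getD, h0]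
      rw [hold]
      have hdw' : numbers.drop (i + 1 - w) = (tail ++ [t]) ++ rest := by
        have hs : i + 1 - w = (i - w) + 1 := by omega
        rw [hs, ← List.tail_drop, hdw]
        simp
      have hdi' : numbers.drop (i + 1) = rest := by
        rw [← List.tail_drop, hdi]
        rfl
      have hm' := matches_ins _ tail t (matches_dec counts old tail hm)
      exact ih (tail ++ [t])
        ((if (counts.insert old (counts.getD old 0 - 1)).getD old 0 == 0 then
            (counts.insert old (counts.getD old 0 - 1)).erase old
          else counts.insert old (counts.getD old 0 - 1)).insert t
          ((if (counts.insert old (counts.getD old 0 - 1)).getD old 0 == 0 then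
              (counts.insert old (counts.getD old 0 - 1)).erase old
            else counts.insert old (counts.getD old 0 - 1)).getD t 0 + 1))
        (i + 1) hm' (by simp at hw ⊢; omega) hdw' hdi' (by omega)

theorem slice_split (numbers : List Int) (p : Int) :
    PySem.List.slice numbers none (some p) ++ PySem.List.slice numbers (some p) none
      = numbers := by
  cases p with
  | ofNat n =>
    rw [show ((Int.ofNat n) : Int) = ((n : Nat) : Int) from rfl,
      PySem.List.slice_to_natCast, PySem.List.slice_from_natCast, List.take_append_drop]
  | negSucc n =>
    have h : (Int.negSucc n) = -(((n + 1 : Nat)) : Int) := by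
      simp [Int.negSucc_eq]
    rw [h, PySem.List.slice_to_neg_natCast numbers (n + 1) (by omega),
      PySem.List.slice_from_neg_natCast numbers (n + 1) (by omega), List.take_append_drop]

-- ===== VERDICT (by name: the statement is the Claim_ definition above) =====
theorem task1_spec : Claim_equal_task1 := by
  intro numbers p _
  show task1 numbers p = task1_alt numbers p
  unfold task1 task1_alt
  set window := PySem.List.slice numbers none (some p) with hw
  set remaining := PySem.List.slice numbers (some p) none with hr
  have hsplit : window ++ remaining = numbers := slice_split numbers p
  refine loop_eq numbers window.length remaining window _ window.length
    (matches_init window) rfl ?_ ?_ le_rfl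
  · simp [← hsplit]
  · rw [← hsplit, List.drop_left]
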